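-- pv_equiv track=rewrite | github.com/iruminii/ECE5470_TDandR | test.py | sort_contours_
-- ===== SOURCE A (Python) =====
-- def sort_contours_(contour):
--     # initially the line bottom is set to be the bottom of the first rect
--     line_bottom = contour[0][1] + contour[0][3] - 1
--     line_begin_idx = 0
--     for i in range(len(contour)):
--         # when a new box's top is below current line's bottom
--         # it's a new line
--         if (contour[i][1] > line_bottom):
--             # sort the previous line by their x
--             contour[line_begin_idx:i] = sorted(contour[line_begin_idx:i], key=lambda b: b[0])
--             line_begin_idx = i
--         # regardless if it's a new line or not
--         # always update the line bottom
--         line_bottom = max(contour[i][1] + contour[i][3] - 1, line_bottom)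
--     # sort the last line
--     contour[line_begin_idx:] = sorted(contour[line_begin_idx:], key=lambda b: b[0])
--     return contour
-- ===== SOURCE B (Python) =====
-- def sort_contours_(contour):
--     # annotate each box with its line index in one pass, then ONE global
--     # stable sort of the whole list by the composite key (line, x)
--     line_bottom = contour[0][1] + contour[0][3] - 1
--     line_no = 0
--     keys = []
--     for b in contour:
--         if b[1] > line_bottom:
--             line_no += 1
--         line_bottom = max(b[1] + b[3] - 1, line_bottom)
--         keys.append(line_no)
--     contour[:] = [b for _, b in sorted(zip(keys, contour), key=lambda kb: (kb[0], kb[1][0]))]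
--     return contour
-- ===== Notes on version B (the rewrite author's own statement) =====
-- stated objective: alternative
-- what changed: Instead of A's grouping-and-per-line slice sorts, B annotates each box with a line index in one pass and then performs a single global stable sort of the whole list by the composite key (line, x).
import Mathlib
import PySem

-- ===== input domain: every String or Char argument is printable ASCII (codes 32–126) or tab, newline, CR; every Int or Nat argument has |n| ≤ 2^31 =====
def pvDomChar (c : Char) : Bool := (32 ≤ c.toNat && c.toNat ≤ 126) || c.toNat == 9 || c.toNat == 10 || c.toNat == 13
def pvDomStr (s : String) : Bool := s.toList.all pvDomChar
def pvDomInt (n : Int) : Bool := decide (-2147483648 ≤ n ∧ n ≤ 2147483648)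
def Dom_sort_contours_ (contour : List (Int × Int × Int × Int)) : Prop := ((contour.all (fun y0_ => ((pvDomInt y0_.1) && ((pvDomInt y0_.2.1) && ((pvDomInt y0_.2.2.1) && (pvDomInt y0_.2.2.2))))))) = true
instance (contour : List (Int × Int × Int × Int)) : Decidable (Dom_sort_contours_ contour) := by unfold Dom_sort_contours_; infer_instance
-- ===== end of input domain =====

-- B computes a per-box line index in one pass and then does ONE global stable sort by the
-- composite key (line, x), instead of A's in-place per-line slice sorts (objective:
-- alternative). Both Pythons mutate their argument in place and return it; the
-- equivalence proved here is about the return value.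

-- ===== PORT A =====
-- bottom of a box (b[1] + b[3] - 1) and sorted(·, key=lambda b: b[0])
def pvBot (x : Int × Int × Int × Int) : Int := x.2.1 + x.2.2.2 - 1
def pvSortX (g : List (Int × Int × Int × Int)) : List (Int × Int × Int × Int) :=
  PySem.List.sorted g (fun b => b.1)

-- one iteration of A's for-loop; state = (contour, line_bottom, line_begin_idx).
-- contour[i] is always in range (slice assignment of a sorted slice preserves the
-- length), so List.getD never hits its default; Python reads contour[i] again for the
-- line_bottom update, but the sorted slice [lbi:i) excludes i so the value is the same.
-- contour[lbi:i] = sorted(...) with 0 ≤ lbi ≤ i ≤ len is exactly take/drop splicing.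
def pvAStep (st : List (Int × Int × Int × Int) × Int × Nat) (i : Nat) :
    List (Int × Int × Int × Int) × Int × Nat :=
  let c := st.1
  let lb := st.2.1
  let lbi := st.2.2
  let ci := c.getD i (0, 0, 0, 0)
  if ci.2.1 > lb then
    (c.take lbi ++ pvSortX ((c.take i).drop lbi) ++ c.drop i, max (pvBot ci) lb, i)
  else
    (c, max (pvBot ci) lb, lbi)

def sort_contours_ (contour : List (Int × Int × Int × Int)) : List (Int × Int × Int × Int) :=
  match contour with
  | [] => []  -- unreachable under Pre_: Python raises IndexError at contour[0]
  | c0 :: _ =>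
    let fin := (List.range contour.length).foldl pvAStep (contour, pvBot c0, 0)
    fin.1.take fin.2.2 ++ pvSortX (fin.1.drop fin.2.2)

-- ===== PORT B =====
-- one iteration of B's for-loop; state = (keys, line_no, line_bottom)
def pvKeyStep (st : List Int × Int × Int) (b : Int × Int × Int × Int) :
    List Int × Int × Int :=
  let ln := if b.2.1 > st.2.2 then st.2.1 + 1 else st.2.1
  (st.1 ++ [ln], ln, max (pvBot b) st.2.2)

def sort_contours__alt (contour : List (Int × Int × Int × Int)) : List (Int × Int × Int × Int) :=
  match contour with
  | [] => contour  -- unreachable under Pre_: Python raises IndexError at contour[0]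
  | c0 :: _ =>
    let fin := contour.foldl pvKeyStep ([], 0, pvBot c0)
    -- sorted(zip(keys, contour), key=lambda kb: (kb[0], kb[1][0])), then take the boxes
    (PySem.List.sorted2 (fin.1.zip contour) (fun kb => kb.1) (fun kb => kb.2.1)).map (·.2)

-- ===== PRECONDITION & SPEC =====
-- Pre_ excludes only the empty list, on which A raises IndexError at contour[0].
def Pre_sort_contours_ (contour : List (Int × Int × Int × Int)) : Prop := contour ≠ []
instance (contour : List (Int × Int × Int × Int)) : Decidable (Pre_sort_contours_ contour) := by
  unfold Pre_sort_contours_; infer_instance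

def pvWitness_sort_contours_ : (List (Int × Int × Int × Int)) := [(0, 0, 1, 1)]

def Spec_sort_contours_ (contour : List (Int × Int × Int × Int)) (out : List (Int × Int × Int × Int)) : Prop := out = sort_contours__alt contour
instance (contour : List (Int × Int × Int × Int)) (out : List (Int × Int × Int × Int)) : Decidable (Spec_sort_contours_ contour out) := by unfold Spec_sort_contours_; infer_instance

-- ===== CLAIM (what is proved, stated in full; the proofs are below) =====
def Claim_equal_sort_contours_ : Prop := ∀ (contour : List (Int × Int × Int × Int)), Dom_sort_contours_ contour → Pre_sort_contours_ contour → Spec_sort_contours_ contour (sort_contours_ contour)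

-- ===== LEMMAS AND PROOFS =====

-- proof-only: the line groups A's loop works through, collected explicitly;
-- state = (groups, line_bottom)
def pvBStep (st : List (List (Int × Int × Int × Int)) × Int) (box : Int × Int × Int × Int) :
    List (List (Int × Int × Int × Int)) × Int :=
  let groups := st.1
  let lb := st.2
  ((if box.2.1 > lb then groups ++ [[box]]
    else groups.dropLast ++ [groups.getLastD [] ++ [box]]),
   max (pvBot box) lb)

-- proof-only: the line-index keys of the groups, group j getting key k + j
def pvAnn : List (List (Int × Int × Int × Int)) → Int → List Int
  | [], _ => []
  | g :: gs, k => List.replicate g.length k ++ pvAnn gs (k + 1)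

-- proof-only: the annotated flat list, group j's boxes paired with key k + j
def pvAnnFlat : List (List (Int × Int × Int × Int)) → Int → List (Int × (Int × Int × Int × Int))
  | [], _ => []
  | g :: gs, k => g.map (fun b => (k, b)) ++ pvAnnFlat gs (k + 1)

theorem pvSortX_nil : pvSortX [] = [] := rfl

theorem pv_len_flatMap_sortX (G : List (List (Int × Int × Int × Int))) :
    (G.flatMap pvSortX).length = G.flatten.length := by
  induction G with
  | nil => rfl
  | cons g G ih => simp [pvSortX, PySem.List.length_sorted, ih]

theorem pv_getD_append_cons (Y Z : List (Int × Int × Int × Int))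
    (x d : Int × Int × Int × Int) : (Y ++ x :: Z).getD Y.length d = x := by
  simp

-- A's loop invariant: after A has processed indices 0..j and the group collector has
-- consumed rest.take j, A's contour is the sorted completed groups ++ the open group ++
-- the untouched suffix, the line_bottoms agree, and line_begin_idx is the length of the
-- completed groups.
theorem pv_loop_rel (c0 : Int × Int × Int × Int) (rest : List (Int × Int × Int × Int))
    (j : Nat) (hj : j ≤ rest.length) :
    ∃ G₀ cur lb,
      (rest.take j).foldl pvBStep ([[c0]], pvBot c0) = (G₀ ++ [cur], lb) ∧
      (List.range (j + 1)).foldl pvAStep (c0 :: rest, pvBot c0, 0)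
        = (G₀.flatMap pvSortX ++ cur ++ (c0 :: rest).drop (j + 1), lb, G₀.flatten.length) ∧
      (G₀ ++ [cur]).flatten = (c0 :: rest).take (j + 1) := by
  induction j with
  | zero =>
    refine ⟨[], [c0], pvBot c0, rfl, ?_, by simp⟩
    show pvAStep (c0 :: rest, pvBot c0, 0) 0 = _
    simp [pvAStep, pvSortX_nil]
  | succ j ih =>
    obtain ⟨G₀, cur, lb, hB, hA, hF⟩ := ih (Nat.le_of_succ_le hj)
    have hjlt : j < rest.length := hj
    have hlen : G₀.flatten.length + cur.length = j + 1 := by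
      have h := congrArg List.length hF
      simp at h
      rw [List.length_flatten]
      omega
    have hPlen : (G₀.flatMap pvSortX).length = G₀.flatten.length := pv_len_flatMap_sortX G₀
    set x := rest[j] with hx
    have htake : rest.take (j + 1) = rest.take j ++ [x] := by
      rw [List.take_add_one, List.getElem?_eq_getElem hjlt]; rfl
    have hdrop : (c0 :: rest).drop (j + 1) = x :: rest.drop (j + 1) := by
      rw [List.drop_succ_cons]
      exact List.drop_eq_getElem_cons hjlt
    have hPClen : (G₀.flatMap pvSortX ++ cur).length = j + 1 := by
      rw [List.length_append, hPlen]; exact hlen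
    have hci : (G₀.flatMap pvSortX ++ cur ++ (c0 :: rest).drop (j + 1)).getD (j + 1)
        ((0 : Int), (0 : Int), (0 : Int), (0 : Int)) = x := by
      rw [hdrop]
      have h := pv_getD_append_cons (G₀.flatMap pvSortX ++ cur) (rest.drop (j + 1)) x
        ((0 : Int), (0 : Int), (0 : Int), (0 : Int))
      rwa [hPClen] at h
    have hx2 : (c0 :: rest)[j + 1]? = some x := by
      rw [List.getElem?_cons_succ]; exact List.getElem?_eq_getElem hjlt
    by_cases hcond : x.2.1 > lb
    · refine ⟨G₀ ++ [cur], [x], max (pvBot x) lb, ?_, ?_, ?_⟩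
      · rw [htake, List.foldl_append, hB]
        simp [pvBStep, hcond]
      · rw [List.range_succ, List.foldl_append, hA]
        show pvAStep _ (j + 1) = _
        simp only [pvAStep]
        rw [hci, if_pos hcond]
        have h1 : (G₀.flatMap pvSortX ++ cur ++ (c0 :: rest).drop (j + 1)).take G₀.flatten.length
            = G₀.flatMap pvSortX := by
          rw [List.append_assoc, ← hPlen, List.take_left]
        have h2 : (G₀.flatMap pvSortX ++ cur ++ (c0 :: rest).drop (j + 1)).take (j + 1)
            = G₀.flatMap pvSortX ++ cur := List.take_left' hPClen
        have h4 : (G₀.flatMap pvSortX ++ cur ++ (c0 :: rest).drop (j + 1)).drop (j + 1)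
            = (c0 :: rest).drop (j + 1) := List.drop_left' hPClen
        have h5 : (G₀.flatMap pvSortX ++ cur).drop G₀.flatten.length = cur := by
          rw [← hPlen, List.drop_left]
        rw [h1, h2, h4, h5, hdrop]
        simp only [List.flatMap_append, List.flatMap_cons, List.flatMap_nil, List.append_nil,
          List.flatten_append, List.flatten_cons, List.flatten_nil, List.length_append,
          List.append_assoc, List.cons_append, List.nil_append, Prod.mk.injEq]
        exact ⟨by rw [List.drop_succ_cons], trivial, by omega⟩
      · have ht2 : (c0 :: rest).take (j + 2) = (c0 :: rest).take (j + 1) ++ [x] := by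
          rw [List.take_add_one (i := j + 1), hx2]; rfl
        rw [ht2, ← hF]
        simp [List.flatten_append]
    · refine ⟨G₀, cur ++ [x], max (pvBot x) lb, ?_, ?_, ?_⟩
      · rw [htake, List.foldl_append, hB]
        simp [pvBStep, hcond]
      · rw [List.range_succ, List.foldl_append, hA]
        show pvAStep _ (j + 1) = _
        simp only [pvAStep]
        rw [hci, if_neg hcond, hdrop]
        simp [List.append_assoc]
      · have ht2 : (c0 :: rest).take (j + 2) = (c0 :: rest).take (j + 1) ++ [x] := by
          rw [List.take_add_one (i := j + 1), hx2]; rfl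
        rw [ht2, ← hF]
        simp [List.flatten_append]

-- keys appended at the end when a group is appended / extended
theorem pvAnn_append_singleton (Gs : List (List (Int × Int × Int × Int)))
    (g : List (Int × Int × Int × Int)) (k : Int) :
    pvAnn (Gs ++ [g]) k = pvAnn Gs k ++ List.replicate g.length (k + Gs.length) := by
  induction Gs generalizing k with
  | nil => simp [pvAnn]
  | cons h t ih =>
    calc pvAnn ((h :: t) ++ [g]) k
        = List.replicate h.length k ++ pvAnn (t ++ [g]) (k + 1) := rfl
      _ = List.replicate h.length k
            ++ (pvAnn t (k + 1) ++ List.replicate g.length ((k + 1) + (t.length : Int))) := by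
          rw [ih]
      _ = pvAnn (h :: t) k ++ List.replicate g.length (k + (((h :: t).length : Int))) := by
          rw [show k + (((h :: t).length : Int)) = (k + 1) + (t.length : Int) by
            simp only [List.length_cons]; push_cast; ring]
          simp [pvAnn, List.append_assoc]

-- B's keys loop tracks the group collector: after both have consumed the same prefix,
-- keys = pvAnn of the groups (first group keyed k0), line_no = k0 + #completed groups,
-- and the line_bottoms agree.
theorem pv_keys_rel (c0 : Int × Int × Int × Int) (rest : List (Int × Int × Int × Int))
    (j : Nat) (hj : j ≤ rest.length) :
    ∃ G₀ cur lb,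
      (rest.take j).foldl pvBStep ([[c0]], pvBot c0) = (G₀ ++ [cur], lb) ∧
      ((c0 :: rest).take (j + 1)).foldl pvKeyStep ([], 0, pvBot c0)
        = (pvAnn (G₀ ++ [cur]) (if c0.2.1 > pvBot c0 then 1 else 0),
           (if c0.2.1 > pvBot c0 then 1 else 0) + (G₀.length : Int), lb) := by
  induction j with
  | zero =>
    refine ⟨[], [c0], pvBot c0, rfl, ?_⟩
    show pvKeyStep ([], 0, pvBot c0) c0 = _
    by_cases h : c0.2.1 > pvBot c0 <;> simp [pvKeyStep, pvAnn, h]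
  | succ j ih =>
    obtain ⟨G₀, cur, lb, hB, hK⟩ := ih (Nat.le_of_succ_le hj)
    have hjlt : j < rest.length := hj
    set x := rest[j] with hx
    set k0 : Int := if c0.2.1 > pvBot c0 then 1 else 0 with hk0
    have htake : rest.take (j + 1) = rest.take j ++ [x] := by
      rw [List.take_add_one, List.getElem?_eq_getElem hjlt]; rfl
    have hx2 : (c0 :: rest)[j + 1]? = some x := by
      rw [List.getElem?_cons_succ]; exact List.getElem?_eq_getElem hjlt
    have ht2 : (c0 :: rest).take (j + 2) = (c0 :: rest).take (j + 1) ++ [x] := by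
      rw [List.take_add_one (i := j + 1), hx2]; rfl
    by_cases hcond : x.2.1 > lb
    · refine ⟨G₀ ++ [cur], [x], max (pvBot x) lb, ?_, ?_⟩
      · rw [htake, List.foldl_append, hB]
        simp [pvBStep, hcond]
      · rw [ht2, List.foldl_append, hK]
        show pvKeyStep _ x = _
        simp only [pvKeyStep, if_pos hcond]
        have e1 : pvAnn (G₀ ++ [cur] ++ [[x]]) k0
            = pvAnn (G₀ ++ [cur]) k0 ++ [k0 + (G₀.length : Int) + 1] := by
          rw [pvAnn_append_singleton (G₀ ++ [cur]) [x] k0]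
          simp
          omega
        have e2 : k0 + (((G₀ ++ [cur]).length : Int)) = k0 + (G₀.length : Int) + 1 := by
          simp only [List.length_append, List.length_cons, List.length_nil]
          push_cast; ring
        rw [e1, e2]
    · refine ⟨G₀, cur ++ [x], max (pvBot x) lb, ?_, ?_⟩
      · rw [htake, List.foldl_append, hB]
        simp [pvBStep, hcond]
      · rw [ht2, List.foldl_append, hK]
        show pvKeyStep _ x = _
        simp only [pvKeyStep, if_neg hcond]
        have h1 : pvAnn (G₀ ++ [cur ++ [x]]) k0
            = pvAnn (G₀ ++ [cur]) k0 ++ [k0 + G₀.length] := by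
          rw [pvAnn_append_singleton, pvAnn_append_singleton]
          simp [List.replicate_succ' (n := cur.length)]
        rw [h1]
-- zipping the keys with the flattened groups gives the annotated flat list
theorem pv_zip_ann (Gs : List (List (Int × Int × Int × Int))) (k : Int) :
    (pvAnn Gs k).zip Gs.flatten = pvAnnFlat Gs k := by
  induction Gs generalizing k with
  | nil => rfl
  | cons g gs ih =>
    show (List.replicate g.length k ++ pvAnn gs (k + 1)).zip (g ++ gs.flatten) = _
    rw [List.zip_append (by simp)]
    rw [ih]
    congr 1
    induction g with
    | nil => rfl
    | cons b t ihg => simpa [List.replicate_succ] using ihg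

-- every key in pvAnnFlat Gs k is ≥ k
theorem pv_annFlat_fst_ge (Gs : List (List (Int × Int × Int × Int))) (k : Int)
    (p : Int × (Int × Int × Int × Int)) (hp : p ∈ pvAnnFlat Gs k) : k ≤ p.1 := by
  induction Gs generalizing k with
  | nil => simp [pvAnnFlat] at hp
  | cons g gs ih =>
    simp only [pvAnnFlat, List.mem_append, List.mem_map] at hp
    rcases hp with ⟨b, _, hb⟩ | h
    · rw [← hb]
    · have := ih (k + 1) h
      omega

-- an insertBy whose element refuses every member of the frozen prefix passes it whole
theorem pv_insertBy_frozen {α : Type} (before : α → α → Bool) (x : α) (S acc : List α)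
    (h : ∀ p ∈ S, before x p = false) :
    PySem.List.insertBy before x (S ++ acc) = S ++ PySem.List.insertBy before x acc := by
  induction S with
  | nil => rfl
  | cons p S ih =>
    simp only [List.cons_append, PySem.List.insertBy, h p (by simp)]
    simp only [Bool.false_eq_true, if_false, List.cons.injEq, true_and]
    exact ih (fun q hq => h q (by simp [hq]))

-- a whole insertion-sort fold passes a frozen prefix of strictly smaller keys
theorem pv_foldl_ins_frozen {α : Type} (before : α → α → Bool) (R S : List α)
    (h : ∀ r ∈ R, ∀ p ∈ S, before r p = false) (acc : List α) :
    R.foldl (fun acc x => PySem.List.insertBy before x acc) (S ++ acc)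
      = S ++ R.foldl (fun acc x => PySem.List.insertBy before x acc) acc := by
  induction R generalizing acc with
  | nil => rfl
  | cons r R ih =>
    simp only [List.foldl_cons]
    rw [pv_insertBy_frozen before r S acc (h r (by simp))]
    exact ih (fun r' hr' => h r' (by simp [hr'])) _

-- insertBy commutes with mapping, when the orders correspond through the map
theorem pv_insertBy_map {α β : Type} (m : α → β) (b1 : α → α → Bool) (b2 : β → β → Bool)
    (hb : ∀ a b, b2 (m a) (m b) = b1 a b) (x : α) (acc : List α) :
    PySem.List.insertBy b2 (m x) (acc.map m) = (PySem.List.insertBy b1 x acc).map m := by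
  induction acc with
  | nil => rfl
  | cons a acc ih =>
    simp only [List.map_cons, PySem.List.insertBy, hb]
    by_cases h : b1 x a = true <;> simp [h, ih]

-- an insertion-sort fold commutes with mapping, when the orders correspond
theorem pv_foldl_ins_map {α β : Type} (m : α → β) (b1 : α → α → Bool) (b2 : β → β → Bool)
    (hb : ∀ a b, b2 (m a) (m b) = b1 a b) (g acc : List α) :
    (g.map m).foldl (fun acc x => PySem.List.insertBy b2 x acc) (acc.map m)
      = (g.foldl (fun acc x => PySem.List.insertBy b1 x acc) acc).map m := by
  induction g generalizing acc with
  | nil => rfl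
  | cons a g ih =>
    simp only [List.map_cons, List.foldl_cons]
    rw [pv_insertBy_map m b1 b2 hb]
    exact ih _

-- the lexicographic comparator sorted2 uses for the key pair (line, x)
def pvLex (a b : Int × (Int × Int × Int × Int)) : Bool :=
  decide (a.1 < b.1) || (!decide (b.1 < a.1) && decide (a.2.1 < b.2.1))

theorem pv_sorted2_eq_fold (xs : List (Int × (Int × Int × Int × Int))) :
    PySem.List.sorted2 xs (fun kb => kb.1) (fun kb => kb.2.1)
      = xs.foldl (fun acc x => PySem.List.insertBy pvLex x acc) [] := rfl

-- one constant-key block: the global lex sort restricted to it is the plain x-sort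
theorem pv_block (g : List (Int × Int × Int × Int)) (k : Int) :
    PySem.List.sorted2 (g.map (fun b => (k, b))) (fun kb => kb.1) (fun kb => kb.2.1)
      = (pvSortX g).map (fun b => (k, b)) := by
  rw [pv_sorted2_eq_fold, pvSortX, PySem.List.sorted_eq_foldl_insertBy]
  have := pv_foldl_ins_map (fun b : Int × Int × Int × Int => (k, b))
    (fun a b => decide (a.1 < b.1)) pvLex
    (by intro a b; simp [pvLex]) g []
  simpa using this

-- the heart of the equivalence: the single lex sort of the annotated flat list is the
-- concatenation of the per-group x-sorts
theorem pv_flat (Gs : List (List (Int × Int × Int × Int))) (k : Int) :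
    (PySem.List.sorted2 (pvAnnFlat Gs k) (fun kb => kb.1) (fun kb => kb.2.1)).map (·.2)
      = Gs.flatMap pvSortX := by
  induction Gs generalizing k with
  | nil => rfl
  | cons g gs ih =>
    have hsplit : PySem.List.sorted2 (pvAnnFlat (g :: gs) k) (fun kb => kb.1) (fun kb => kb.2.1)
        = PySem.List.sorted2 (g.map (fun b => (k, b))) (fun kb => kb.1) (fun kb => kb.2.1)
          ++ PySem.List.sorted2 (pvAnnFlat gs (k + 1)) (fun kb => kb.1) (fun kb => kb.2.1) := by
      rw [pv_sorted2_eq_fold, pv_sorted2_eq_fold, pv_sorted2_eq_fold]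
      show (g.map (fun b => (k, b)) ++ pvAnnFlat gs (k + 1)).foldl _ [] = _
      rw [List.foldl_append]
      have hS := PySem.List.sorted2_perm (g.map (fun b => (k, b)))
        (fun kb => kb.1) (fun kb => kb.2.1) false
      rw [pv_sorted2_eq_fold] at hS
      have hfst : ∀ p ∈ (g.map (fun b => (k, b))).foldl
          (fun acc x => PySem.List.insertBy pvLex x acc) [], p.1 = k := by
        intro p hp
        have := hS.mem_iff.mp hp
        simp only [List.mem_map] at this
        obtain ⟨b, _, hb⟩ := this
        rw [← hb]
      have := pv_foldl_ins_frozen pvLex (pvAnnFlat gs (k + 1))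
        ((g.map (fun b => (k, b))).foldl (fun acc x => PySem.List.insertBy pvLex x acc) [])
        (by
          intro r hr p hp
          have h1 : k + 1 ≤ r.1 := pv_annFlat_fst_ge gs (k + 1) r hr
          have h2 : p.1 = k := hfst p hp
          simp only [pvLex, Bool.or_eq_false_iff, Bool.and_eq_false_iff]
          constructor
          · simp; omega
          · left; simp; omega) []
      simpa using this
    rw [show pvAnnFlat (g :: gs) k = g.map (fun b => (k, b)) ++ pvAnnFlat gs (k + 1) from rfl] at hsplit
    show (PySem.List.sorted2 (g.map (fun b => (k, b)) ++ pvAnnFlat gs (k + 1)) _ _).map (·.2) = _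
    rw [hsplit, List.map_append, pv_block, ih (k + 1)]
    simp [List.flatMap_cons]

-- ===== VERDICT (by name: the statement is the Claim_ definition above) =====
theorem sort_contours__spec : Claim_equal_sort_contours_ := by
  intro contour _ hpre
  unfold Spec_sort_contours_
  match contour, hpre with
  | [], h => exact absurd rfl h
  | c0 :: rest, _ =>
    obtain ⟨G₀, cur, lb, hB, hA, hF⟩ := pv_loop_rel c0 rest rest.length le_rfl
    obtain ⟨G₁, cur₁, lb₁, hB₁, hK⟩ := pv_keys_rel c0 rest rest.length le_rfl
    rw [List.take_length] at hB hB₁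
    -- the two collector runs are the same run
    rw [hB] at hB₁
    have h1 : G₀ ++ [cur] = G₁ ++ [cur₁] := congrArg Prod.fst hB₁
    obtain ⟨hG, hc⟩ := List.append_inj' h1 (by simp)
    have hc' : cur = cur₁ := by simpa using hc
    subst hG
    subst hc'
    -- A's side: sorted completed groups ++ sort of the open group
    have hPlen : (G₀.flatMap pvSortX).length = G₀.flatten.length := pv_len_flatMap_sortX G₀
    have hdropnil : (c0 :: rest).drop (rest.length + 1) = [] := by simp
    rw [hdropnil, List.append_nil] at hA
    have hAres : sort_contours_ (c0 :: rest) = (G₀ ++ [cur]).flatMap pvSortX := by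
      simp only [sort_contours_, List.length_cons]
      rw [hA]
      rw [← hPlen, List.take_left, List.drop_left]
      simp [List.flatMap_append]
    -- B's side: keys fold over the whole list, then the one global sort
    have htakeall : (c0 :: rest).take (rest.length + 1) = c0 :: rest := by simp
    rw [htakeall] at hK
    have hflat : (G₀ ++ [cur]).flatten = c0 :: rest := by rw [hF, htakeall]
    have hBres : sort_contours__alt (c0 :: rest) = (G₀ ++ [cur]).flatMap pvSortX := by
      simp only [sort_contours__alt]
      rw [hK]
      show ((PySem.List.sorted2 ((pvAnn (G₀ ++ [cur]) _).zip (c0 :: rest)) _ _).map (·.2)) = _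
      rw [← hflat, pv_zip_ann, pv_flat]
    rw [hAres, hBres]
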